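-- pv_equiv track=rewrite | github.com/anteloc/ldbuilder-ai | src/python/ldraw_collisions.py | _parse_mpd
-- ===== SOURCE A (Python) =====
-- from typing import Dict, List, Optional, Set, Tuple
--
-- def _parse_mpd(text: str) -> Dict[str, List[str]]:
--     lines = text.splitlines()
--     subs: Dict[str, List[str]] = {}
--     cur: Optional[str] = None
--     buf: List[str] = []
--     saw = False
--     for ln in lines:
--         s = ln.strip()
--         if s.startswith("0") and len(s) > 1 and s[1:2].isspace():
--             rest = s[2:].lstrip()
--             if rest.upper().startswith("FILE "):
--                 if cur is not None:
--                     subs[cur] = buf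
--                 saw = True
--                 cur = rest[5:].strip()
--                 buf = [ln]
--                 continue
--         buf.append(ln)
--     if saw and cur is not None:
--         subs[cur] = buf
--     elif not saw:
--         subs["__main__"] = lines
--     return subs
-- ===== SOURCE B (Python) =====
-- def _parse_mpd(text: str):
--     lines = text.splitlines()
--
--     def header_name(ln):
--         s = ln.strip()
--         if s.startswith("0") and len(s) > 1 and s[1:2].isspace():
--             rest = s[2:].lstrip()
--             if rest.upper().startswith("FILE "):
--                 return rest[5:].strip()
--         return None
--
--     i = 0
--     while i < len(lines) and header_name(lines[i]) is None:
--         i += 1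
--     if i == len(lines):
--         return {"__main__": lines}
--
--     name, hline, ls = header_name(lines[i]), lines[i], lines[i + 1:]
--     groups = []
--     while True:
--         k = 0
--         while k < len(ls) and header_name(ls[k]) is None:
--             k += 1
--         groups.append((name, [hline] + ls[:k]))
--         if k == len(ls):
--             break
--         name, hline, ls = header_name(ls[k]), ls[k], ls[k + 1:]
--     return dict(groups)
-- ===== Notes on version B (the rewrite author's own statement) =====
-- stated objective: alternative
-- what changed: A streams all lines through one fold carrying dict/cur/buf/saw flags with an end-of-loop flush; B first skips to the first FILE header, then splits the remainder into (name, group) chunks with an inner scan-to-next-header loop, and builds the dict from that pair list in one final step.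
import Mathlib
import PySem

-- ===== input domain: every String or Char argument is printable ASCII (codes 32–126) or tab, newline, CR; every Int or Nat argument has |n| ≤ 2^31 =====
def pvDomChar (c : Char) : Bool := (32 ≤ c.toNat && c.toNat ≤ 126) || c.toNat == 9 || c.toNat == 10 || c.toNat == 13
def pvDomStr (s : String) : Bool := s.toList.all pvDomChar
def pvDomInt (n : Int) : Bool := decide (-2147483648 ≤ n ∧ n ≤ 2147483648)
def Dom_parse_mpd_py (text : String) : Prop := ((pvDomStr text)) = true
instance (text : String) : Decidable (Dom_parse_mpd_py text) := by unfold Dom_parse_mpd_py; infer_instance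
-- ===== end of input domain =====

-- B replaces A's single streaming fold (dict + cur/buf/saw flags) by a two-phase decomposition:
-- skip to the first FILE header, split the rest into (name, group) pairs, then build the dict once.
-- Objective: alternative (same cost); return-value equivalence only (no mutation involved).


-- ===== PORT A =====
-- A's loop body, transliterated: state (subs, cur, buf, saw)
def pvStepA (st : PySem.Dict String (List String) × Option String × List String × Bool)
    (ln : String) : PySem.Dict String (List String) × Option String × List String × Bool :=
  match st with
  | (subs, cur, buf, saw) =>
    let s := PySem.Str.strip ln
    if PySem.Str.startswith s "0" && decide (1 < PySem.Str.len s) &&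
        PySem.Str.strIsspace (PySem.Str.slice s (some 1) (some 2)) then
      let rest := PySem.Str.lstrip (PySem.Str.slice s (some 2) none)
      if PySem.Str.startswith (PySem.Str.upper rest) "FILE " then
        ((match cur with
          | some c => subs.insert c buf
          | none => subs),
         some (PySem.Str.strip (PySem.Str.slice rest (some 5) none)), [ln], true)
      else (subs, cur, buf ++ [ln], saw)
    else (subs, cur, buf ++ [ln], saw)

def parse_mpd_py (text : String) : List (String × List String) :=
  let lines := PySem.Str.splitlines text
  match lines.foldl pvStepA (PySem.Dict.empty, none, [], false) with
  | (subs, cur, buf, saw) =>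
    (if saw then
       match cur with
       | some c => subs.insert c buf
       | none => subs
     else subs.insert "__main__" lines).items

-- ===== PORT B =====
-- header_name: returns the sub-file name iff the line is a FILE header (same predicate as A's guard)
def pvHeaderName? (ln : String) : Option String :=
  let s := PySem.Str.strip ln
  if PySem.Str.startswith s "0" && decide (1 < PySem.Str.len s) &&
      PySem.Str.strIsspace (PySem.Str.slice s (some 1) (some 2)) then
    let rest := PySem.Str.lstrip (PySem.Str.slice s (some 2) none)
    if PySem.Str.startswith (PySem.Str.upper rest) "FILE " then
      some (PySem.Str.strip (PySem.Str.slice rest (some 5) none))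
    else none
  else none

-- B's grouping loop: the inner 'while k' scan is takeWhile/dropWhile, the outer loop is tail recursion
def pvGroups (name : String) (hline : String) (ls : List String) : List (String × List String) :=
  let body := ls.takeWhile (fun l => (pvHeaderName? l).isNone)
  match h : ls.dropWhile (fun l => (pvHeaderName? l).isNone) with
  | [] => [(name, hline :: body)]
  | l :: rest =>
    (name, hline :: body) ::
      (match pvHeaderName? l with
       | some nm => pvGroups nm l rest
       | none => [])   -- unreachable: dropWhile stops at a header
termination_by ls.length
decreasing_by
  have := List.length_dropWhile_le (p := fun l => (pvHeaderName? l).isNone) (l := ls)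
  rw [h] at this; simp at this; omega

def parse_mpd_py_alt (text : String) : List (String × List String) :=
  let lines := PySem.Str.splitlines text
  match lines.dropWhile (fun l => (pvHeaderName? l).isNone) with
  | [] => [("__main__", lines)]
  | l :: rest =>
    (match pvHeaderName? l with
     | some nm =>
       (pvGroups nm l rest).foldl (fun (d : PySem.Dict String (List String)) (kv : String × List String) => d.insert kv.1 kv.2) PySem.Dict.empty
     | none => PySem.Dict.empty).items   -- unreachable: dropWhile stops at a header

-- ===== PRECONDITION & SPEC =====
def Spec_parse_mpd_py (text : String) (out : List (String × List String)) : Prop := out = parse_mpd_py_alt text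
instance (text : String) (out : List (String × List String)) : Decidable (Spec_parse_mpd_py text out) := by unfold Spec_parse_mpd_py; infer_instance

-- ===== CLAIM (what is proved, stated in full; the proofs are below) =====
def Claim_equal_parse_mpd_py : Prop := ∀ (text : String), Dom_parse_mpd_py text → Spec_parse_mpd_py text (parse_mpd_py text)

-- ===== LEMMAS AND PROOFS =====

-- proof-side structural version of pvGroups, generalized over the accumulated group prefix
def pvGroupsGen (c : String) (buf : List String) : List String → List (String × List String)
  | [] => [(c, buf)]
  | l :: ls =>
    match pvHeaderName? l with
    | some nm => (c, buf) :: pvGroupsGen nm [l] ls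
    | none => pvGroupsGen c (buf ++ [l]) ls

theorem pvStepA_none {ln : String} (h : pvHeaderName? ln = none) (subs cur buf saw) :
    pvStepA (subs, cur, buf, saw) ln = (subs, cur, buf ++ [ln], saw) := by
  unfold pvHeaderName? at h
  simp only [pvStepA]
  split_ifs at h ⊢ <;> simp_all

theorem pvStepA_some {ln nm : String} (h : pvHeaderName? ln = some nm) (subs cur buf saw) :
    pvStepA (subs, cur, buf, saw) ln =
      ((match cur with
        | some c => subs.insert c buf
        | none => subs), some nm, [ln], true) := by
  unfold pvHeaderName? at h
  simp only [pvStepA]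
  split_ifs at h ⊢ <;> simp_all

theorem pvGroupsGen_cons_none {l : String} (h : pvHeaderName? l = none) (c buf ls) :
    pvGroupsGen c buf (l :: ls) = pvGroupsGen c (buf ++ [l]) ls := by
  simp [pvGroupsGen, h]

theorem pvGroupsGen_cons_some {l nm : String} (h : pvHeaderName? l = some nm) (c buf ls) :
    pvGroupsGen c buf (l :: ls) = (c, buf) :: pvGroupsGen nm [l] ls := by
  simp [pvGroupsGen, h]


theorem pvPredFalse_of_dropWhile_cons {p : String → Bool} :
    ∀ {ls : List String} {l : String} {rest : List String},
      ls.dropWhile p = l :: rest → p l = false := by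
  intro ls
  induction ls with
  | nil => intro l rest h; simp at h
  | cons a t ih =>
    intro l rest h
    rw [List.dropWhile_cons] at h
    split at h
    · exact ih h
    · cases h; simp_all

-- takeWhile/dropWhile characterization of pvGroupsGen
theorem pvGroupsGen_td : ∀ (ls : List String) (c : String) (buf : List String),
    pvGroupsGen c buf ls =
      (c, buf ++ ls.takeWhile (fun l => (pvHeaderName? l).isNone)) ::
        (match ls.dropWhile (fun l => (pvHeaderName? l).isNone) with
         | [] => []
         | l :: rest =>
           match pvHeaderName? l with
           | some nm => pvGroupsGen nm [l] rest
           | none => []) := by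
  intro ls
  induction ls with
  | nil => intro c buf; simp [pvGroupsGen]
  | cons l ls ih =>
    intro c buf
    cases h : pvHeaderName? l with
    | none =>
      rw [pvGroupsGen_cons_none h, ih]
      simp [h]
    | some nm =>
      rw [pvGroupsGen_cons_some h]
      simp [h]

-- B's jumping recursion computes the structural groups
theorem pvGroups_eq_gen (c hline : String) (ls : List String) :
    pvGroups c hline ls = pvGroupsGen c [hline] ls := by
  induction c, hline, ls using pvGroups.induct with
  | case1 c hline ls h =>
    rw [pvGroups, pvGroupsGen_td]
    split
    · simp [h]
    · next _ _ heq => rw [h] at heq; cases heq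
  | case2 c hline ls l rest h ih =>
    rw [pvGroups, pvGroupsGen_td]
    split
    · next heq => rw [h] at heq; cases heq
    · next l' rest' heq =>
      rw [h] at heq
      cases heq
      rw [h]
      cases hn : pvHeaderName? l with
      | none => simp [hn]
      | some nm => simp [hn, ih nm]

-- main-phase invariant: once a header has been seen, finishing the fold and inserting the
-- trailing (cur, buf) equals folding the structural groups into the dict
theorem pvFold_main (ml : List String) (ls : List String) : ∀ (c : String) (buf : List String)
    (subs : PySem.Dict String (List String)),
    (match ls.foldl pvStepA (subs, some c, buf, true) with
     | (subs', cur', buf', saw') =>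
       (if saw' then
          match cur' with
          | some c' => subs'.insert c' buf'
          | none => subs'
        else subs'.insert "__main__" ml) ) =
      (pvGroupsGen c buf ls).foldl (fun (d : PySem.Dict String (List String)) (kv : String × List String) => d.insert kv.1 kv.2) subs := by
  induction ls with
  | nil => intro c buf subs; simp [pvGroupsGen]
  | cons l ls ih =>
    intro c buf subs
    cases h : pvHeaderName? l with
    | none =>
      rw [List.foldl_cons, pvStepA_none h, pvGroupsGen_cons_none h]
      exact ih c (buf ++ [l]) subs
    | some nm =>
      rw [List.foldl_cons, pvStepA_some h, pvGroupsGen_cons_some h]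
      simp only [List.foldl_cons]
      exact ih nm [l] (subs.insert c buf)

-- pre-header phase: lines with no header just accumulate into buf
theorem pvFold_pre (pre : List String) (h : ∀ l ∈ pre, pvHeaderName? l = none) :
    ∀ (subs : PySem.Dict String (List String)) (buf : List String),
    pre.foldl pvStepA (subs, none, buf, false) = (subs, none, buf ++ pre, false) := by
  induction pre with
  | nil => intro subs buf; simp
  | cons l ls ih =>
    intro subs buf
    rw [List.foldl_cons, pvStepA_none (h l (by simp)), ih (fun x hx => h x (by simp [hx]))]
    simp

-- ===== VERDICT (by name: the statement is the Claim_ definition above) =====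
theorem parse_mpd_py_spec : Claim_equal_parse_mpd_py := by
  unfold Claim_equal_parse_mpd_py Spec_parse_mpd_py
  intro text _
  unfold parse_mpd_py parse_mpd_py_alt
  simp only
  set lines := PySem.Str.splitlines text with hlines
  have hsplit : lines.takeWhile (fun l => (pvHeaderName? l).isNone) ++
      lines.dropWhile (fun l => (pvHeaderName? l).isNone) = lines :=
    List.takeWhile_append_dropWhile
  have hpre : ∀ l ∈ lines.takeWhile (fun l => (pvHeaderName? l).isNone), pvHeaderName? l = none := by
    intro l hm
    have := List.mem_takeWhile_imp hm
    simpa [Option.isNone_iff_eq_none] using this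
  cases hd : lines.dropWhile (fun l => (pvHeaderName? l).isNone) with
  | nil =>
    have htake : lines.takeWhile (fun l => (pvHeaderName? l).isNone) = lines := by
      rw [hd] at hsplit; simpa using hsplit
    rw [htake] at hpre
    rw [pvFold_pre lines hpre]
    rfl
  | cons l rest =>
    obtain ⟨nm, hnm⟩ : ∃ nm, pvHeaderName? l = some nm := by
      have hp := pvPredFalse_of_dropWhile_cons hd
      cases hx : pvHeaderName? l with
      | none => simp [hx] at hp
      | some nm => exact ⟨nm, rfl⟩
    conv_lhs => rw [show lines = lines.takeWhile (fun l => (pvHeaderName? l).isNone) ++ (l :: rest) by rw [← hd, hsplit]]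
    rw [List.foldl_append, pvFold_pre _ hpre, List.foldl_cons, pvStepA_some hnm]
    have hmain := pvFold_main (lines.takeWhile (fun l => (pvHeaderName? l).isNone) ++ l :: rest) rest nm [l] PySem.Dict.empty
    rcases hX : rest.foldl pvStepA (PySem.Dict.empty, some nm, [l], true) with ⟨s', st⟩
    rcases st with ⟨c', b', w'⟩
    rw [hX] at hmain
    simp only at hmain ⊢
    rw [hmain, hnm]
    simp [pvGroups_eq_gen]
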